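-- pv_equiv track=rewrite | github.com/konigin144/trashlator | app/translator.py | _merge_translated_chunks
-- ===== SOURCE A (Python) =====
-- def _merge_translated_chunks(translated_chunks: list[str]) -> str:
--     if not translated_chunks:
--         return ""
--
--     merged = translated_chunks[0].strip()
--
--     for next_chunk in translated_chunks[1:]:
--         next_chunk = next_chunk.strip()
--
--         if not next_chunk:
--             continue
--
--         merged_words = merged.split()
--         next_words = next_chunk.split()
--
--         max_overlap = min(len(merged_words), len(next_words), 30)
--         overlap_size = 0
--
--         for size in range(max_overlap, 0, -1):
--             if merged_words[-size:] == next_words[:size]: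
--                 overlap_size = size
--                 break
--
--         if overlap_size > 0:
--             merged = " ".join(merged_words + next_words[overlap_size:])
--         else:
--             merged = f"{merged} {next_chunk}".strip()
--
--     return merged.strip()
-- ===== SOURCE B (Python) =====
-- def _merge_translated_chunks(translated_chunks: list[str]) -> str:
--     # Boundary overlaps are found with a KMP failure (prefix) function over
--     # next-words + [None] + last-30-merged-words, instead of trying every
--     # overlap length and comparing slices.
--     merged = ""
--     for chunk in translated_chunks:
--         chunk = chunk.strip()
--         if not chunk:
--             continue
--         if not merged:
--             merged = chunk
--             continue
--         words = merged.split()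
--         nxt = chunk.split()
--         seq = [*nxt[:30], None, *words[-30:]]
--         pi = [0]
--         for i in range(1, len(seq)):
--             k = pi[i - 1]
--             while k and seq[i] != seq[k]:
--                 k = pi[k - 1]
--             if seq[i] == seq[k]:
--                 k += 1
--             pi.append(k)
--         overlap = pi[-1]
--         if overlap:
--             merged = " ".join(words + nxt[overlap:])
--         else:
--             merged = merged + " " + chunk
--     return merged
-- ===== Notes on version B (the rewrite author's own statement) =====
-- stated objective: alternative
-- what changed: A finds each boundary overlap by trying every candidate length from largest down and comparing word slices; B computes it in one linear pass with a KMP failure (prefix) function over next-words + separator + last-30-merged-words.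
import Mathlib
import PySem

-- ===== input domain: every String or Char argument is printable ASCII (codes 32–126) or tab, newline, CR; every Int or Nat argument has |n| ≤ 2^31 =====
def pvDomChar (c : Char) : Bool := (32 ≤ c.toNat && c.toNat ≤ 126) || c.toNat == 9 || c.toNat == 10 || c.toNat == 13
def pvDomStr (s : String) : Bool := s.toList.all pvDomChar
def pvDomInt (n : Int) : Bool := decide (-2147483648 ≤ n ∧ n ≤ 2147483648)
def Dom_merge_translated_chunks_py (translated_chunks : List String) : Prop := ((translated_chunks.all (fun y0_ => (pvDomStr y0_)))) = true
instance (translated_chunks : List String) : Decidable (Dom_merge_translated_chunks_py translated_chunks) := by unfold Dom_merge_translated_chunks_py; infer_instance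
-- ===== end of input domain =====

-- B finds each boundary overlap with a KMP failure (prefix) function over
-- next-words + separator + last-30-merged-words, instead of A's descending
-- scan over all candidate lengths with slice comparisons (alternative algorithm).

-- ===== PORT A =====
-- 'for size in range(max_overlap, 0, -1): if merged_words[-size:] == next_words[:size]: overlap_size = size; break'
def pvOvLoopA (mw nw : List (List Char)) : Nat → Nat
  | 0 => 0
  | s + 1 =>
      if PySem.List.slice mw (some (-((s : Int) + 1))) none
           = PySem.List.slice nw none (some ((s : Int) + 1))
      then s + 1 else pvOvLoopA mw nw s

-- the body of A's 'for next_chunk in translated_chunks[1:]' loop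
def pvStepA (merged : List Char) (next_chunk : String) : List Char :=
  let nc := PySem.Chars.strip next_chunk.toList
  if nc = [] then merged
  else
    let mw := PySem.Chars.split₀ merged
    let nw := PySem.Chars.split₀ nc
    let maxOv := min (min mw.length nw.length) 30
    let ov := pvOvLoopA mw nw maxOv
    if ov > 0 then PySem.Chars.join [' '] (mw ++ PySem.List.slice nw (some (ov : Int)) none)
    else PySem.Chars.strip (merged ++ ' ' :: nc)

def merge_translated_chunks_py (translated_chunks : List String) : String :=
  match translated_chunks with
  | [] => ""
  | c :: rest =>
      let merged := rest.foldl pvStepA (PySem.Chars.strip c.toList)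
      String.ofList (PySem.Chars.strip merged)

-- ===== PORT B =====
-- 'while k and seq[i] != seq[k]: k = pi[k-1]'  (fuel = starting k: k strictly
-- decreases each iteration, so the fuel is never exhausted before the loop exits;
-- list indices are always in range in every reachable call, so getD's default is never read)
def pvFall (x : Option (List Char)) (seq : List (Option (List Char))) (pi : List Nat) :
    Nat → Nat → Nat
  | 0, k => k
  | fuel + 1, k =>
      if k ≠ 0 ∧ seq.getD k none ≠ x then pvFall x seq pi fuel (pi.getD (k - 1) 0) else k

-- the body of B's 'for i in range(1, len(seq))' loop
def pvPiStep (seq : List (Option (List Char))) (pi : List Nat) (i : Nat) : List Nat :=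
  let k0 := pi.getD (i - 1) 0
  let k1 := pvFall (seq.getD i none) seq pi k0 k0
  let k2 := if seq.getD i none = seq.getD k1 none then k1 + 1 else k1
  pi ++ [k2]

-- 'pi = [0]; for i in range(1, len(seq)): ... pi.append(k)'
def pvBuildPi (seq : List (Option (List Char))) : List Nat :=
  (List.range' 1 (seq.length - 1)).foldl (pvPiStep seq) [0]

-- the body of B's 'for chunk in translated_chunks' loop
def pvStepB (merged : List Char) (chunk : String) : List Char :=
  let seg := PySem.Chars.strip chunk.toList
  if seg = [] then merged
  else if merged = [] then seg
  else
    let words := PySem.Chars.split₀ merged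
    let nxt := PySem.Chars.split₀ seg
    let seq := (PySem.List.slice nxt none (some 30)).map some ++
        none :: (PySem.List.slice words (some (-30)) none).map some
    let pi := pvBuildPi seq
    let ov := pi.getLastD 0
    if ov ≠ 0 then PySem.Chars.join [' '] (words ++ PySem.List.slice nxt (some (ov : Int)) none)
    else merged ++ ' ' :: seg

def merge_translated_chunks_py_alt (translated_chunks : List String) : String :=
  String.ofList (translated_chunks.foldl pvStepB [])

-- ===== PRECONDITION & SPEC =====
def Spec_merge_translated_chunks_py (translated_chunks : List String) (out : String) : Prop := out = merge_translated_chunks_py_alt translated_chunks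
instance (translated_chunks : List String) (out : String) : Decidable (Spec_merge_translated_chunks_py translated_chunks out) := by unfold Spec_merge_translated_chunks_py; infer_instance

-- ===== CLAIM (what is proved, stated in full; the proofs are below) =====
def Claim_equal_merge_translated_chunks_py : Prop := ∀ (translated_chunks : List String), Dom_merge_translated_chunks_py translated_chunks → Spec_merge_translated_chunks_py translated_chunks (merge_translated_chunks_py translated_chunks)

-- ===== LEMMAS AND PROOFS =====

/- ---------- whitespace / split / join toolbox ---------- -/

def pvClean (w : List Char) : Prop := w ≠ [] ∧ ∀ c ∈ w, PySem.Chars.isspace c = false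

theorem pv_clean_go (s : List Char) : ∀ cur acc,
    (∀ a ∈ acc, a ≠ [] ∧ ∀ c ∈ a, PySem.Chars.isspace c = false) →
    (∀ c ∈ cur, PySem.Chars.isspace c = false) →
    ∀ w ∈ PySem.Chars.split₀.go s cur acc, pvClean w := by
  induction s with
  | nil =>
    intro cur acc hacc hcur w hw
    simp only [PySem.Chars.split₀.go] at hw
    by_cases h : cur = []
    · simp [h] at hw
      obtain ⟨h1, h2⟩ := hacc w hw
      exact ⟨h1, h2⟩
    · simp [List.isEmpty_iff, h] at hw
      rcases hw with hmem' | rfl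
      · exact ⟨(hacc _ hmem').1, (hacc _ hmem').2⟩
      · exact ⟨by simpa using h, fun c hc => hcur c (List.mem_reverse.1 hc)⟩
  | cons c rest ih =>
    intro cur acc hacc hcur w hw
    simp only [PySem.Chars.split₀.go] at hw
    by_cases hc : PySem.Chars.isspace c = true
    · by_cases h : cur = []
      · simp only [hc, if_true, h, List.isEmpty_nil] at hw
        exact ih [] acc hacc (by simp) w hw
      · simp only [hc, if_true, List.isEmpty_iff, h, if_false] at hw
        refine ih [] (cur.reverse :: acc) ?_ (by simp) w hw
        intro a ha
        rcases List.mem_cons.1 ha with rfl | ha'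
        · exact ⟨by simpa using h, fun d hd => hcur d (List.mem_reverse.1 hd)⟩
        · exact hacc a ha'
    · simp only [hc, if_false, Bool.false_eq_true] at hw
      refine ih (c :: cur) acc hacc ?_ w hw
      intro d hd
      rcases List.mem_cons.1 hd with rfl | hd'
      · simpa using hc
      · exact hcur d hd'

theorem pv_clean_split (s : List Char) : ∀ w ∈ PySem.Chars.split₀ s, pvClean w :=
  pv_clean_go s [] [] (by simp) (by simp)

theorem pv_dropWhile_head {p : Char → Bool} (s : List Char) :
    ∀ h : s.dropWhile p ≠ [], p ((s.dropWhile p).head h) = false := by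
  induction s with
  | nil => intro h; exact absurd rfl h
  | cons c t ih =>
    intro h
    by_cases hc : p c = true
    · simp only [List.dropWhile_cons, hc, if_true] at h ⊢
      exact ih h
    · simp only [List.dropWhile_cons, hc, Bool.false_eq_true, if_false] at h ⊢
      simpa using hc

theorem pv_dropWhile_self {p : Char → Bool} {s : List Char}
    (h : ∀ hs : s ≠ [], p (s.head hs) = false) : s.dropWhile p = s := by
  cases s with
  | nil => rfl
  | cons c t =>
    have hc := h (by simp)
    simp only [List.head_cons] at hc
    simp [hc]

theorem pv_lstrip_lstrip (s : List Char) :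
    PySem.Chars.lstrip (PySem.Chars.lstrip s) = PySem.Chars.lstrip s := by
  unfold PySem.Chars.lstrip
  exact pv_dropWhile_self (fun hs => pv_dropWhile_head s hs)

theorem pv_rstrip_rstrip (s : List Char) :
    PySem.Chars.rstrip (PySem.Chars.rstrip s) = PySem.Chars.rstrip s := by
  unfold PySem.Chars.rstrip
  rw [List.reverse_reverse]
  rw [pv_dropWhile_self (fun hs => pv_dropWhile_head s.reverse hs)]

theorem pv_len_lstrip (s : List Char) : (PySem.Chars.lstrip s).length ≤ s.length := by
  unfold PySem.Chars.lstrip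
  exact List.length_dropWhile_le _ _

theorem pv_len_rstrip (s : List Char) : (PySem.Chars.rstrip s).length ≤ s.length := by
  unfold PySem.Chars.rstrip
  simpa using List.length_dropWhile_le _ s.reverse

theorem pv_strip_parts {s : List Char} (h : PySem.Chars.strip s = s) :
    PySem.Chars.lstrip s = s ∧ PySem.Chars.rstrip s = s := by
  have h1 : (PySem.Chars.lstrip s).length = s.length := by
    have := pv_len_rstrip (PySem.Chars.lstrip s)
    have := pv_len_lstrip s
    have hl : (PySem.Chars.strip s).length = s.length := by rw [h]
    unfold PySem.Chars.strip at hl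
    omega
  have hls : PySem.Chars.lstrip s = s := by
    unfold PySem.Chars.lstrip at h1 ⊢
    exact (List.dropWhile_suffix _).eq_of_length h1
  constructor
  · exact hls
  · have := h
    unfold PySem.Chars.strip at this
    rw [hls] at this
    exact this

theorem pv_lstrip_prefix {u t : List Char} (hu : u <+: t) (ht : PySem.Chars.lstrip t = t) :
    PySem.Chars.lstrip u = u := by
  unfold PySem.Chars.lstrip at ht ⊢
  rw [List.dropWhile_eq_self_iff] at ht ⊢
  intro hl
  have hlt : 0 < t.length := lt_of_lt_of_le hl hu.length_le
  rw [List.IsPrefix.getElem hu hl]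
  exact ht hlt

theorem pv_rstrip_prefix_of (t : List Char) : PySem.Chars.rstrip t <+: t := by
  unfold PySem.Chars.rstrip
  have h : (t.reverse.dropWhile PySem.Chars.isspace) <:+ t.reverse := List.dropWhile_suffix _
  obtain ⟨pre, hpre⟩ := h
  refine ⟨pre.reverse, ?_⟩
  have := congrArg List.reverse hpre
  simpa using this

theorem pv_strip_strip (s : List Char) : PySem.Chars.strip (PySem.Chars.strip s) = PySem.Chars.strip s := by
  show PySem.Chars.rstrip (PySem.Chars.lstrip (PySem.Chars.strip s)) = PySem.Chars.strip s
  have h1 : PySem.Chars.lstrip (PySem.Chars.strip s) = PySem.Chars.strip s := by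
    show PySem.Chars.lstrip (PySem.Chars.rstrip (PySem.Chars.lstrip s)) = _
    exact pv_lstrip_prefix (pv_rstrip_prefix_of _) (pv_lstrip_lstrip s)
  rw [h1]
  show PySem.Chars.rstrip (PySem.Chars.rstrip (PySem.Chars.lstrip s)) = _
  exact pv_rstrip_rstrip _

theorem pv_strip_cons_ws {b : List Char} (hb : PySem.Chars.strip b = b) :
    PySem.Chars.strip (' ' :: b) = b := by
  obtain ⟨hl, hr⟩ := pv_strip_parts hb
  show PySem.Chars.rstrip (PySem.Chars.lstrip (' ' :: b)) = b
  have : PySem.Chars.lstrip (' ' :: b) = PySem.Chars.lstrip b := by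
    unfold PySem.Chars.lstrip
    simp [show PySem.Chars.isspace ' ' = true from rfl]
  rw [this, hl, hr]

theorem pv_strip_glue {a b : List Char} (ha : PySem.Chars.strip a = a) (ha' : a ≠ [])
    (hb : PySem.Chars.strip b = b) (hb' : b ≠ []) :
    PySem.Chars.strip (a ++ ' ' :: b) = a ++ ' ' :: b := by
  obtain ⟨hal, har⟩ := pv_strip_parts ha
  obtain ⟨hbl, hbr⟩ := pv_strip_parts hb
  show PySem.Chars.rstrip (PySem.Chars.lstrip (a ++ ' ' :: b)) = _
  have h1 : PySem.Chars.lstrip (a ++ ' ' :: b) = a ++ ' ' :: b := by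
    unfold PySem.Chars.lstrip
    refine pv_dropWhile_self ?_
    intro hs
    have hha : a.head ha' = (a ++ ' ' :: b).head hs := (List.head_append_left ha').symm
    rw [← hha]
    have := pv_strip_parts ha |>.1
    unfold PySem.Chars.lstrip at this
    rw [List.dropWhile_eq_self_iff] at this
    have h0 : 0 < a.length := List.length_pos_of_ne_nil ha'
    have := this h0
    simpa [List.head_eq_getElem] using this
  rw [h1]
  unfold PySem.Chars.rstrip
  have h2 : (a ++ ' ' :: b).reverse = b.reverse ++ (' ' :: a.reverse) := by simp
  rw [h2]
  have hb'' : b.reverse ≠ [] := by simpa using hb'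
  have h3 : List.dropWhile PySem.Chars.isspace (b.reverse ++ ' ' :: a.reverse)
      = b.reverse ++ ' ' :: a.reverse := by
    refine pv_dropWhile_self ?_
    intro hs
    rw [List.head_append_left hb'']
    unfold PySem.Chars.rstrip at hbr
    have : List.dropWhile PySem.Chars.isspace b.reverse = b.reverse := by
      have := congrArg List.reverse hbr
      simpa using this
    rw [List.dropWhile_eq_self_iff] at this
    have h0 : 0 < b.reverse.length := List.length_pos_of_ne_nil hb''
    have := this h0
    simpa [List.head_eq_getElem] using this
  rw [h3]
  simp

theorem pv_strip_clean {w : List Char} (h : ∀ c ∈ w, PySem.Chars.isspace c = false) :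
    PySem.Chars.strip w = w := by
  show PySem.Chars.rstrip (PySem.Chars.lstrip w) = w
  have h1 : PySem.Chars.lstrip w = w := by
    unfold PySem.Chars.lstrip
    exact pv_dropWhile_self (fun hs => h _ (List.head_mem hs))
  rw [h1]
  unfold PySem.Chars.rstrip
  rw [pv_dropWhile_self (fun hs => h _ (by
    have := List.head_mem hs
    exact List.mem_reverse.1 this))]
  simp

theorem pv_join_cons (w : List Char) (ws : List (List Char)) (h : ws ≠ []) :
    PySem.Chars.join [' '] (w :: ws) = w ++ ' ' :: PySem.Chars.join [' '] ws := by
  unfold PySem.Chars.join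
  cases ws with
  | nil => exact absurd rfl h
  | cons v vs => simp [List.intercalate, List.intersperse]

theorem pv_join_ne_nil {p : List Char} {ps : List (List Char)} (hp : p ≠ []) :
    PySem.Chars.join [' '] (p :: ps) ≠ [] := by
  cases ps with
  | nil =>
    show PySem.Chars.join [' '] [p] ≠ []
    simpa [PySem.Chars.join, List.intercalate] using hp
  | cons q qs =>
    rw [pv_join_cons p (q :: qs) (by simp)]
    simp [hp]

theorem pv_strip_join (ws : List (List Char)) (h : ∀ w ∈ ws, pvClean w) :
    PySem.Chars.strip (PySem.Chars.join [' '] ws) = PySem.Chars.join [' '] ws := by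
  induction ws with
  | nil => rfl
  | cons w ws' ih =>
    cases ws' with
    | nil =>
      have hj : PySem.Chars.join [' '] [w] = w := by simp [PySem.Chars.join, List.intercalate]
      rw [hj]
      exact pv_strip_clean (h w (by simp)).2
    | cons v vs =>
      rw [pv_join_cons w (v :: vs) (by simp)]
      exact pv_strip_glue (pv_strip_clean (h w (by simp)).2) (h w (by simp)).1
        (ih (fun x hx => h x (by simp [hx]))) (pv_join_ne_nil (h v (by simp)).1)

/- ---------- slice helpers ---------- -/

theorem pv_slice_neg {α : Type} (xs : List α) (k : Nat) (h1 : 1 ≤ k) (h2 : k ≤ xs.length) :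
    PySem.List.slice xs (some (-(k : Int))) none = xs.drop (xs.length - k) := by
  simp only [PySem.List.slice, PySem.List.clampIdx]
  have hneg : -(k : Int) < 0 := by omega
  rw [if_pos hneg]
  have : ¬ ((xs.length : Int) + -(k : Int) < 0) := by omega
  rw [if_neg this]
  have ha : ((xs.length : Int) + -(k : Int)).toNat = xs.length - k := by omega
  rw [ha]
  have hlen : (xs.drop (xs.length - k)).length = k := by
    rw [List.length_drop]; omega
  rw [List.take_of_length_le (by omega)]

theorem pv_slice_take {α : Type} (xs : List α) (k : Nat) :
    PySem.List.slice xs none (some ((k : Int))) = xs.take k := by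
  rw [PySem.List.slice_to xs (by omega)]
  simp

/- ---------- borders and the prefix function ---------- -/

-- 'k is a (proper) border of the length-i prefix of seq'
def pvBord (seq : List (Option (List Char))) (i k : Nat) : Prop :=
  k < i ∧ seq.take k = (seq.take i).drop (i - k)

-- longest proper border of the length-i prefix
def pvMB (seq : List (Option (List Char))) (i : Nat) : Nat :=
  Nat.findGreatest (fun k => k < i ∧ seq.take k = (seq.take i).drop (i - k)) (i - 1)

theorem pvGetD {l : List (Option (List Char))} {n : Nat} (h : n < l.length) :
    l.getD n none = l[n] := by
  simp [List.getD_eq_getElem?_getD, List.getElem?_eq_getElem h]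

theorem pvTake_succ {l : List (Option (List Char))} {k : Nat} (h : k < l.length) :
    l.take (k + 1) = l.take k ++ [l[k]] := by
  rw [List.take_add_one, List.getElem?_eq_getElem h]; rfl

theorem pvBord_zero (seq : List (Option (List Char))) {i : Nat} (h : 0 < i) :
    pvBord seq i 0 := by
  refine ⟨h, ?_⟩
  rw [List.take_zero, Nat.sub_zero]
  symm
  rw [List.drop_eq_nil_iff]
  simp

theorem pvBord_succ {seq : List (Option (List Char))} {i k : Nat} (hi : i < seq.length) :
    pvBord seq (i + 1) (k + 1) ↔ (pvBord seq i k ∧ seq.getD k none = seq.getD i none) := by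
  constructor
  · rintro ⟨hlt, heq⟩
    have hk : k < i := by omega
    have hkl : k < seq.length := by omega
    rw [pvTake_succ hkl, pvTake_succ hi, show i + 1 - (k + 1) = i - k from by omega,
        List.drop_append_of_le_length (by simp; omega)] at heq
    have hlen : (seq.take k).length = ((seq.take i).drop (i - k)).length := by simp; omega
    obtain ⟨e1, e2⟩ := List.append_inj heq hlen
    have e3 : seq[k] = seq[i] := by simpa using e2
    exact ⟨⟨hk, e1⟩, by rw [pvGetD hkl, pvGetD hi, e3]⟩
  · rintro ⟨⟨hk, he⟩, hgd⟩
    have hkl : k < seq.length := by omega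
    refine ⟨by omega, ?_⟩
    rw [pvTake_succ hkl, pvTake_succ hi, show i + 1 - (k + 1) = i - k from by omega,
        List.drop_append_of_le_length (by simp; omega), he]
    have e3 : seq[k] = seq[i] := by rw [← pvGetD hkl, ← pvGetD hi]; exact hgd
    rw [e3]

theorem pvBord_comp {seq : List (Option (List Char))} {i k b : Nat}
    (h1 : pvBord seq i k) (h2 : pvBord seq k b) : pvBord seq i b := by
  obtain ⟨hk, e1⟩ := h1
  obtain ⟨hb, e2⟩ := h2
  refine ⟨by omega, ?_⟩
  rw [e2, e1, List.drop_drop, show i - k + (k - b) = i - b from by omega]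

theorem pvBord_down {seq : List (Option (List Char))} {i k b : Nat}
    (hb : pvBord seq i b) (hk : pvBord seq i k) (hlt : b < k) : pvBord seq k b := by
  have h1 := hb.1
  have h2 := hk.1
  refine ⟨hlt, ?_⟩
  rw [hk.2, List.drop_drop, show i - k + (k - b) = i - b from by omega]
  exact hb.2

theorem pvMB_bord {seq : List (Option (List Char))} {i : Nat} (h : pvMB seq i ≠ 0) :
    pvBord seq i (pvMB seq i) := by
  unfold pvMB at h ⊢
  exact (Nat.findGreatest_eq_iff.mp rfl).2.1 h

theorem pvBord_le_pvMB {seq : List (Option (List Char))} {i b : Nat}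
    (hb : pvBord seq i b) : b ≤ pvMB seq i := by
  unfold pvMB
  exact Nat.le_findGreatest (by have := hb.1; omega) hb

theorem pvMB_le {seq : List (Option (List Char))} {i : Nat} : pvMB seq i ≤ i - 1 := by
  unfold pvMB
  exact Nat.findGreatest_le _

/- ---------- the fall loop finds the longest matching border ---------- -/

theorem pvFall_spec (seq : List (Option (List Char))) (pi : List Nat) (i : Nat)
    (hpi : ∀ j, j < i → pi.getD j 0 = pvMB seq (j + 1)) :
    ∀ fuel k, k ≤ fuel → (k = 0 ∨ pvBord seq i k) →
      (∀ b, pvBord seq i b → seq.getD b none = seq.getD i none → b ≤ k) →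
      (pvFall (seq.getD i none) seq pi fuel k = 0 ∨
        (pvBord seq i (pvFall (seq.getD i none) seq pi fuel k) ∧
          seq.getD (pvFall (seq.getD i none) seq pi fuel k) none = seq.getD i none)) ∧
      (∀ b, pvBord seq i b → seq.getD b none = seq.getD i none →
        b ≤ pvFall (seq.getD i none) seq pi fuel k) := by
  intro fuel
  induction fuel with
  | zero =>
    intro k hk hbord hmax
    have hk0 : k = 0 := by omega
    subst hk0
    exact ⟨Or.inl rfl, hmax⟩
  | succ fuel ih =>
    intro k hk hbord hmax
    by_cases hc : k ≠ 0 ∧ seq.getD k none ≠ seq.getD i none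
    · have hk0 : k ≠ 0 := hc.1
      have hbk : pvBord seq i k := hbord.resolve_left hk0
      have hk1 : pi.getD (k - 1) 0 = pvMB seq k := by
        have := hpi (k - 1) (by have := hbk.1; omega)
        rwa [show k - 1 + 1 = k from by omega] at this
      rw [show pvFall (seq.getD i none) seq pi (fuel + 1) k
            = pvFall (seq.getD i none) seq pi fuel (pi.getD (k - 1) 0) from by
          simp only [pvFall]; rw [if_pos hc]]
      refine ih (pi.getD (k - 1) 0) ?_ ?_ ?_
      · rw [hk1]
        have h1 : pvMB seq k ≤ k - 1 := pvMB_le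
        omega
      · rw [hk1]
        by_cases hz : pvMB seq k = 0
        · exact Or.inl hz
        · exact Or.inr (pvBord_comp hbk (pvMB_bord hz))
      · intro b hb he
        rw [hk1]
        have hbK : b ≤ k := hmax b hb he
        have hbne : b ≠ k := fun h => hc.2 (h ▸ he)
        exact pvBord_le_pvMB (pvBord_down hb hbk (by omega))
    · rw [show pvFall (seq.getD i none) seq pi (fuel + 1) k = k from by
          simp only [pvFall]; rw [if_neg hc]]
      by_cases hk0 : k = 0
      · exact ⟨Or.inl hk0, hmax⟩
      · have he : seq.getD k none = seq.getD i none := by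
          by_contra hne
          exact hc ⟨hk0, hne⟩
        exact ⟨Or.inr ⟨hbord.resolve_left hk0, he⟩, hmax⟩

/- ---------- one step of the pi-building loop computes the next pvMB ---------- -/

theorem pvMB_step (seq : List (Option (List Char))) (pi : List Nat) (i : Nat)
    (hi1 : 1 ≤ i) (hi : i < seq.length)
    (hpi : ∀ j, j < i → pi.getD j 0 = pvMB seq (j + 1)) :
    pvPiStep seq pi i = pi ++ [pvMB seq (i + 1)] := by
  have hk0 : pi.getD (i - 1) 0 = pvMB seq i := by
    have := hpi (i - 1) (by omega)
    rwa [show i - 1 + 1 = i from by omega] at this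
  have hinit1 : pi.getD (i - 1) 0 = 0 ∨ pvBord seq i (pi.getD (i - 1) 0) := by
    rw [hk0]
    by_cases hz : pvMB seq i = 0
    · exact Or.inl hz
    · exact Or.inr (pvMB_bord hz)
  have hinit2 : ∀ b, pvBord seq i b → seq.getD b none = seq.getD i none →
      b ≤ pi.getD (i - 1) 0 := by
    intro b hb _
    rw [hk0]
    exact pvBord_le_pvMB hb
  obtain ⟨hres, hmax⟩ :=
    pvFall_spec seq pi i hpi (pi.getD (i - 1) 0) (pi.getD (i - 1) 0) le_rfl hinit1 hinit2
  simp only [pvPiStep]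
  set r := pvFall (seq.getD i none) seq pi (pi.getD (i - 1) 0) (pi.getD (i - 1) 0) with hr
  refine congrArg (fun z => pi ++ [z]) ?_
  by_cases hx : seq.getD i none = seq.getD r none
  · rw [if_pos hx]
    have hb1 : pvBord seq (i + 1) (r + 1) := by
      rw [pvBord_succ hi]
      refine ⟨?_, hx.symm⟩
      rcases hres with h0 | hres
      · rw [h0]; exact pvBord_zero seq (by omega)
      · exact hres.1
    have hle1 : r + 1 ≤ pvMB seq (i + 1) := pvBord_le_pvMB hb1
    have hle2 : pvMB seq (i + 1) ≤ r + 1 := by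
      by_cases hz : pvMB seq (i + 1) = 0
      · omega
      · have hbm := pvMB_bord hz
        have e : pvMB seq (i + 1) - 1 + 1 = pvMB seq (i + 1) := by omega
        have h2 := (pvBord_succ hi).mp (by rw [e]; exact hbm)
        have := hmax _ h2.1 h2.2
        omega
    omega
  · rw [if_neg hx]
    have hr0 : r = 0 := by
      rcases hres with h0 | ⟨_, he⟩
      · exact h0
      · exact absurd he.symm hx
    by_cases hz : pvMB seq (i + 1) = 0
    · rw [hz, hr0]
    · exfalso
      have hbm := pvMB_bord hz
      have e : pvMB seq (i + 1) - 1 + 1 = pvMB seq (i + 1) := by omega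
      have h2 := (pvBord_succ hi).mp (by rw [e]; exact hbm)
      have hle := hmax _ h2.1 h2.2
      have h0 : pvMB seq (i + 1) - 1 = 0 := by omega
      rw [h0] at h2
      exact hx (by rw [hr0]; exact h2.2.symm)

/- ---------- the whole pi list ---------- -/

theorem pvBuildPi_inv (seq : List (Option (List Char))) :
    ∀ m, m + 1 ≤ seq.length →
      ((List.range' 1 m).foldl (pvPiStep seq) [0]).length = m + 1 ∧
      ∀ j, j ≤ m → ((List.range' 1 m).foldl (pvPiStep seq) [0]).getD j 0 = pvMB seq (j + 1) := by
  intro m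
  induction m with
  | zero =>
    intro _
    refine ⟨rfl, ?_⟩
    intro j hj
    have hj0 : j = 0 := by omega
    subst hj0
    have h1 : pvMB seq 1 = 0 := by unfold pvMB; simp
    rw [h1]
    rfl
  | succ m ih =>
    intro hlen
    obtain ⟨ihL, ihG⟩ := ih (by omega)
    rw [List.range'_concat, List.foldl_append]
    set pi := (List.range' 1 m).foldl (pvPiStep seq) [0] with hpi
    simp only [List.foldl_cons, List.foldl_nil]
    have hstep : pvPiStep seq pi (1 + 1 * m) = pi ++ [pvMB seq (m + 1 + 1)] := by
      rw [show 1 + 1 * m = m + 1 from by omega]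
      exact pvMB_step seq pi (m + 1) (by omega) (by omega) (fun j hj => ihG j (by omega))
    rw [hstep]
    refine ⟨by simp [ihL], ?_⟩
    intro j hj
    by_cases hcase : j ≤ m
    · rw [List.getD_append _ _ _ _ (by rw [ihL]; omega)]
      exact ihG j hcase
    · have hj1 : j = m + 1 := by omega
      subst hj1
      rw [show m + 1 = pi.length from ihL.symm]
      simp [List.getD_eq_getElem?_getD]

theorem pvGetLastD (l : List Nat) (d : Nat) : l.getLastD d = l.getD (l.length - 1) d := by
  cases l with
  | nil => rfl
  | cons a t => simp [List.getLastD_eq_getLast?, List.getLast?_eq_getElem?, List.getD_eq_getElem?_getD]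

theorem pvBuildPi_last (seq : List (Option (List Char))) (h : 1 ≤ seq.length) :
    (pvBuildPi seq).getLastD 0 = pvMB seq seq.length := by
  obtain ⟨hL, hG⟩ := pvBuildPi_inv seq (seq.length - 1) (by omega)
  unfold pvBuildPi
  rw [pvGetLastD, hL, show seq.length - 1 + 1 - 1 = seq.length - 1 from by omega,
      hG (seq.length - 1) le_rfl, show seq.length - 1 + 1 = seq.length from by omega]

/- ---------- the separator collapses borders to prefix/suffix overlaps ---------- -/

theorem pvSep_bord_iff (pat tail : List (Option (List Char))) (k : Nat)
    (hk : k ≤ min pat.length tail.length) :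
    pvBord (pat ++ none :: tail) (pat ++ none :: tail).length k ↔
      pat.take k = tail.drop (tail.length - k) := by
  have hlen : (pat ++ none :: tail).length = pat.length + tail.length + 1 := by simp; omega
  have htake : (pat ++ none :: tail).take k = pat.take k :=
    List.take_append_of_le_length (by omega)
  have hdrop : (pat ++ none :: tail).drop ((pat ++ none :: tail).length - k)
      = tail.drop (tail.length - k) := by
    rw [show (pat ++ none :: tail).length - k
          = pat.length + 1 + (tail.length - k) from by simp; omega,
        List.drop_append, List.drop_eq_nil_iff.mpr (by omega), List.nil_append,
        show pat.length + 1 + (tail.length - k) - pat.length = (tail.length - k) + 1 from by omega,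
        List.drop_succ_cons]
  constructor
  · rintro ⟨-, he⟩
    rwa [List.take_length, htake, hdrop] at he
  · intro h
    refine ⟨by omega, ?_⟩
    rw [List.take_length, htake, hdrop]
    exact h

theorem pvSep_not_bord (pat tail : List (Option (List Char)))
    (hp : ∀ a ∈ pat, a ≠ none) (ht : ∀ a ∈ tail, a ≠ none) (k : Nat)
    (hk1 : min pat.length tail.length < k) (hk2 : k < (pat ++ none :: tail).length) :
    ¬ pvBord (pat ++ none :: tail) (pat ++ none :: tail).length k := by
  set seq := pat ++ none :: tail with hseq
  have hlen : seq.length = pat.length + tail.length + 1 := by simp [hseq]; omega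
  have hassoc : seq = (pat ++ [none]) ++ tail := by simp [hseq]
  rintro ⟨-, he⟩
  rw [List.take_length] at he
  have hsep : ∀ (h : pat.length < seq.length), seq[pat.length] = none := by
    intro h
    rw [List.getElem_of_eq hseq h, List.getElem_append_right le_rfl]
    simp
  by_cases hT : tail.length < k
  · have hpP : k - tail.length - 1 < pat.length := by omega
    have h1 : (seq.take k)[k - tail.length - 1]'(by simp; omega)
        = (seq.drop (seq.length - k))[k - tail.length - 1]'(by simp; omega) :=
      List.getElem_of_eq he _
    rw [List.getElem_take, List.getElem_drop] at h1
    have hidx : seq.length - k + (k - tail.length - 1) = pat.length := by omega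
    simp only [hidx] at h1
    rw [hsep (by omega)] at h1
    have h2 : seq[k - tail.length - 1]'(by omega) = pat[k - tail.length - 1] := by
      rw [List.getElem_of_eq hseq (by omega), List.getElem_append_left hpP]
    rw [h2] at h1
    exact hp _ (List.getElem_mem _) h1
  · have hP : pat.length < k := by omega
    have h1 : (seq.take k)[pat.length]'(by simp; omega)
        = (seq.drop (seq.length - k))[pat.length]'(by simp; omega) :=
      List.getElem_of_eq he _
    rw [List.getElem_take, List.getElem_drop] at h1
    have hidx : seq.length - k + pat.length
        = (pat ++ [none]).length + (pat.length + tail.length - k) := by simp; omega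
    simp only [hidx] at h1
    have h2 : seq[(pat ++ [none]).length + (pat.length + tail.length - k)]'(by simp [hlen]; omega)
        = tail[pat.length + tail.length - k]'(by omega) := by
      rw [List.getElem_of_eq hassoc (by simp [hlen]; omega),
          List.getElem_append_right (by simp)]
      simp
    rw [h2] at h1
    have h3 : seq[pat.length]'(by omega) = none := hsep (by omega)
    rw [h3] at h1
    exact ht _ (List.getElem_mem _) h1.symm

/- ---------- Nat.findGreatest bookkeeping ---------- -/

theorem pvFG_shrink (P : Nat → Prop) [DecidablePred P] (m : Nat) :
    ∀ d, (∀ k, m < k → k ≤ m + d → ¬ P k) →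
      Nat.findGreatest P (m + d) = Nat.findGreatest P m := by
  intro d
  induction d with
  | zero => intro _; rfl
  | succ e ih =>
    intro h
    have hne : ¬ P (m + e + 1) := h _ (by omega) (by omega)
    rw [show m + (e + 1) = m + e + 1 from by omega, Nat.findGreatest_succ, if_neg hne]
    exact ih (fun k h1 h2 => h k h1 (by omega))

theorem pvFG_congr (P Q : Nat → Prop) [DecidablePred P] [DecidablePred Q] :
    ∀ m, (∀ k, 1 ≤ k → k ≤ m → (P k ↔ Q k)) →
      Nat.findGreatest P m = Nat.findGreatest Q m := by
  intro m
  induction m with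
  | zero => intro _; rfl
  | succ e ih =>
    intro h
    rw [Nat.findGreatest_succ, Nat.findGreatest_succ]
    by_cases hp : P (e + 1)
    · rw [if_pos hp, if_pos ((h _ (by omega) (by omega)).mp hp)]
    · rw [if_neg hp, if_neg (fun hq => hp ((h _ (by omega) (by omega)).mpr hq))]
      exact ih (fun k h1 h2 => h k h1 (by omega))

theorem pvMB_sep (pat tail : List (Option (List Char)))
    (hp : ∀ a ∈ pat, a ≠ none) (ht : ∀ a ∈ tail, a ≠ none) :
    pvMB (pat ++ none :: tail) (pat ++ none :: tail).length
      = Nat.findGreatest (fun k => pat.take k = tail.drop (tail.length - k))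
          (min pat.length tail.length) := by
  have hlen : (pat ++ none :: tail).length = pat.length + tail.length + 1 := by simp; omega
  unfold pvMB
  rw [show (pat ++ none :: tail).length - 1
        = min pat.length tail.length
            + (pat.length + tail.length - min pat.length tail.length) from by omega]
  rw [pvFG_shrink
    (fun k => k < (pat ++ none :: tail).length ∧
      (pat ++ none :: tail).take k =
        ((pat ++ none :: tail).take (pat ++ none :: tail).length).drop
          ((pat ++ none :: tail).length - k))
    (min pat.length tail.length) (pat.length + tail.length - min pat.length tail.length)
    (fun k h1k h2k hPk => pvSep_not_bord pat tail hp ht k h1k (by omega) hPk)]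
  exact pvFG_congr
    (fun k => k < (pat ++ none :: tail).length ∧
      (pat ++ none :: tail).take k =
        ((pat ++ none :: tail).take (pat ++ none :: tail).length).drop
          ((pat ++ none :: tail).length - k))
    (fun k => pat.take k = tail.drop (tail.length - k))
    (min pat.length tail.length)
    (fun k _ h2k => pvSep_bord_iff pat tail k h2k)

/- ---------- tying both overlap computations together ---------- -/

theorem pvMapSomeInj (a b : List (List Char)) :
    a.map Option.some = b.map Option.some ↔ a = b :=
  ⟨fun h => List.map_injective_iff.mpr (Option.some_injective _) h, fun h => by rw [h]⟩

theorem pvOvLoopA_eq (mw nw : List (List Char)) :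
    ∀ bnd, bnd ≤ mw.length →
      pvOvLoopA mw nw bnd
        = Nat.findGreatest (fun k => mw.drop (mw.length - k) = nw.take k) bnd := by
  intro bnd
  induction bnd with
  | zero => intro _; rfl
  | succ t ih =>
    intro hb
    rw [Nat.findGreatest_succ]
    show (if PySem.List.slice mw (some (-((t : Int) + 1))) none
            = PySem.List.slice nw none (some ((t : Int) + 1))
          then t + 1 else pvOvLoopA mw nw t) = _
    have e1 : PySem.List.slice mw (some (-((t : Int) + 1))) none
        = mw.drop (mw.length - (t + 1)) := by
      rw [show (-((t : Int) + 1)) = -(((t + 1 : Nat)) : Int) from by push_cast; ring]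
      exact pv_slice_neg mw (t + 1) (by omega) hb
    have e2 : PySem.List.slice nw none (some ((t : Int) + 1)) = nw.take (t + 1) := by
      rw [show ((t : Int) + 1) = (((t + 1 : Nat)) : Int) from by push_cast; ring]
      exact pv_slice_take nw (t + 1)
    rw [e1, e2, ih (by omega)]

theorem pvOverlap_eq (words nxt : List (List Char)) :
    (pvBuildPi ((PySem.List.slice nxt none (some 30)).map some ++
        none :: (PySem.List.slice words (some (-30)) none).map some)).getLastD 0
      = pvOvLoopA words nxt (min (min words.length nxt.length) 30) := by
  have hps : PySem.List.slice nxt none (some 30) = nxt.take 30 := by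
    simpa using pv_slice_take nxt 30
  have hts : PySem.List.slice words (some (-30)) none = words.drop (words.length - 30) :=
    PySem.List.slice_from_neg_ofNat words 30 (by omega)
  rw [hps, hts]
  set pat := nxt.take 30 with hpat
  set tail := words.drop (words.length - 30) with htail
  have hTlen : tail.length = words.length - (words.length - 30) := by rw [htail]; simp
  have h1 : 1 ≤ (pat.map Option.some ++ none :: tail.map Option.some).length := by simp; omega
  rw [pvBuildPi_last _ h1]
  rw [pvMB_sep _ _ (by simp) (by simp)]
  rw [pvOvLoopA_eq words nxt _ (by omega)]
  have hbnd : min (pat.map Option.some).length (tail.map Option.some).length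
      = min (min words.length nxt.length) 30 := by
    simp [hpat, hTlen]
    omega
  rw [hbnd]
  refine pvFG_congr _ _ _ ?_
  intro k h1k h2k
  have e3 : (pat.map Option.some).take k = (pat.take k).map Option.some := by simp
  have e4 : (tail.map Option.some).drop ((tail.map Option.some).length - k)
      = (tail.drop (tail.length - k)).map Option.some := by simp
  rw [e3, e4, pvMapSomeInj]
  have e5 : pat.take k = nxt.take k := by
    rw [hpat, List.take_take]
    congr 1
    omega
  have e6 : tail.drop (tail.length - k) = words.drop (words.length - k) := by
    rw [hTlen, htail, List.drop_drop]
    congr 1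
    omega
  rw [e5, e6]
  exact ⟨Eq.symm, Eq.symm⟩

/- ---------- step and fold equivalence ---------- -/

theorem pvSplit_nil : PySem.Chars.split₀ ([] : List Char) = [] := rfl

theorem pvStep_eq (merged : List Char) (c : String)
    (h : PySem.Chars.strip merged = merged) :
    pvStepA merged c = pvStepB merged c ∧
      PySem.Chars.strip (pvStepA merged c) = pvStepA merged c := by
  unfold pvStepA pvStepB
  by_cases hs : PySem.Chars.strip c.toList = []
  · rw [hs]
    simp [h]
  · rw [if_neg hs, if_neg hs]
    by_cases hm : merged = []
    · rw [if_pos hm]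
      subst hm
      have hg := pv_strip_cons_ws (pv_strip_strip c.toList)
      simp only [pvSplit_nil, List.length_nil, Nat.zero_min, pvOvLoopA, gt_iff_lt,
        Nat.lt_irrefl, if_false, List.nil_append, hg]
      exact ⟨by trivial, pv_strip_strip c.toList⟩
    · rw [if_neg hm]
      have hov := pvOverlap_eq (PySem.Chars.split₀ merged)
        (PySem.Chars.split₀ (PySem.Chars.strip c.toList))
      simp only [hov]
      set ov := pvOvLoopA (PySem.Chars.split₀ merged)
        (PySem.Chars.split₀ (PySem.Chars.strip c.toList))
        (min (min (PySem.Chars.split₀ merged).length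
          (PySem.Chars.split₀ (PySem.Chars.strip c.toList)).length) 30) with hovdef
      by_cases hz : ov = 0
      · rw [if_neg (by omega), if_neg (by simp [hz])]
        have hglue := pv_strip_glue h hm (pv_strip_strip c.toList) hs
        exact ⟨hglue, by rw [hglue]; exact hglue⟩
      · rw [if_pos (by omega), if_pos hz]
        refine ⟨rfl, ?_⟩
        apply pv_strip_join
        intro w hw
        rcases List.mem_append.1 hw with h1 | h1
        · exact pv_clean_split _ _ h1
        · rw [PySem.List.slice_from_natCast] at h1
          exact pv_clean_split _ _ (List.mem_of_mem_drop h1)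

theorem pvFold_eq : ∀ (cs : List String) (merged : List Char),
    PySem.Chars.strip merged = merged →
    cs.foldl pvStepA merged = cs.foldl pvStepB merged ∧
      PySem.Chars.strip (cs.foldl pvStepA merged) = cs.foldl pvStepA merged := by
  intro cs
  induction cs with
  | nil => intro merged h; exact ⟨rfl, h⟩
  | cons c cs ih =>
    intro merged h
    obtain ⟨he, hstr⟩ := pvStep_eq merged c h
    obtain ⟨ih1, ih2⟩ := ih (pvStepA merged c) hstr
    simp only [List.foldl_cons]
    exact ⟨by rw [← he]; exact ih1, ih2⟩

theorem pvStepB_start (c : String) : pvStepB [] c = PySem.Chars.strip c.toList := by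
  unfold pvStepB
  by_cases hs : PySem.Chars.strip c.toList = []
  · rw [hs]; simp
  · rw [if_neg hs, if_pos rfl]

theorem pv_main (tcs : List String) :
    merge_translated_chunks_py tcs = merge_translated_chunks_py_alt tcs := by
  cases tcs with
  | nil => rfl
  | cons c rest =>
    unfold merge_translated_chunks_py merge_translated_chunks_py_alt
    simp only [List.foldl_cons]
    rw [pvStepB_start]
    obtain ⟨he, hstr⟩ := pvFold_eq rest (PySem.Chars.strip c.toList) (pv_strip_strip c.toList)
    rw [hstr, he]

-- ===== VERDICT (by name: the statement is the Claim_ definition above) =====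
theorem merge_translated_chunks_py_spec : Claim_equal_merge_translated_chunks_py := by
  intro tcs _
  unfold Spec_merge_translated_chunks_py
  exact pv_main tcs
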